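-- pv_equiv track=rewrite | github.com/lrq3000/pyFileFixity | lib/reedsolomon/reedsolo.py | rs_forney_syndromes
-- ===== SOURCE A (Python) =====
-- gf_exp = [1] * 512
--
-- gf_log = [0] * 256
--
-- def gf_mul(x, y):
--     if x == 0 or y == 0:
--         return 0
--     return gf_exp[(gf_log[x] + gf_log[y]) % 255]
--
-- def rs_forney_syndromes(synd, pos, nmess):
--     # Compute Forney syndromes, which is kind of an enhanced version of the other calculation of syndromes. Do not confuse this with Forney algorithm, which allows to correct the message based on the location of errors.
--     fsynd = list(synd)      # make a copy
--     for i in range(0, len(pos)):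
--         x = gf_exp[nmess - 1 - pos[i]]
--         for i in range(0, len(fsynd) - 1):
--             fsynd[i] = gf_mul(fsynd[i], x) ^ fsynd[i + 1]
--         fsynd.pop()
--     return fsynd
-- ===== SOURCE B (Python) =====
-- gf_exp = [1] * 512
--
-- gf_log = [0] * 256
--
-- def gf_mul(x, y):
--     if x == 0 or y == 0:
--         return 0
--     return gf_exp[(gf_log[x] + gf_log[y]) % 255]
--
-- def rs_forney_syndromes(synd, pos, nmess):
--     # Streaming pipeline: one left-to-right pass over synd, pushing each element
--     # through an m-level cascade (state[k] = newest value of elimination row k);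
--     # once all m levels are warmed up, each cascaded value is an output element.
--     # This replaces A's m staged whole-list passes (mutate + pop) by a single pass.
--     m = len(pos)
--     xs = [gf_exp[nmess - 1 - p] for p in pos]
--     state = []
--     out = []
--     for s in synd:
--         cur = s
--         new_state = []
--         for st, x in zip(state, xs):
--             new_state.append(cur)
--             cur = gf_mul(st, x) ^ cur
--         if len(state) < m:
--             new_state.append(cur)
--         else:
--             out.append(cur)
--         state = new_state
--     return out
-- ===== Notes on version B (the rewrite author's own statement) =====
-- stated objective: alternative
-- what changed: B makes a single streaming pass over synd, pushing each element through an m-level cascade state (a pipeline of the m eliminations), instead of A's m staged whole-list passes with in-place mutation and pop.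
import Mathlib
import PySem

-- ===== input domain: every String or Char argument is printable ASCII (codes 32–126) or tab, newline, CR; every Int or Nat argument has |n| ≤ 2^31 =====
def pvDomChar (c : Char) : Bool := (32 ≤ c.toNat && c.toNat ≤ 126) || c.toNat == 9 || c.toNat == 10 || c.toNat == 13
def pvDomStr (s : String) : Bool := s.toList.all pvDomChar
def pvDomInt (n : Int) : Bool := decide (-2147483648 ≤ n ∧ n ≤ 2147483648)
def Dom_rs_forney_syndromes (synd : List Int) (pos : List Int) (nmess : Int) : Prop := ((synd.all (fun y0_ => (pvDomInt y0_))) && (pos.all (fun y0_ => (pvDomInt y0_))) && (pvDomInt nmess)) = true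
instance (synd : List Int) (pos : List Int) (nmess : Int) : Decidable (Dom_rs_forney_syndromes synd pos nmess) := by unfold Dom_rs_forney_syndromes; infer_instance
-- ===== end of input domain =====

-- B replaces A's len(pos) staged whole-list passes (in-place mutate + pop) by a
-- SINGLE streaming pass over synd with an m-level cascade state (a pipeline)
-- (objective: alternative; same cost). Return-value equivalence only: neither
-- implementation mutates its arguments.

-- ===== PORT A =====
-- gf_exp = [1] * 512 ; gf_log = [0] * 256  (the module-level tables, as given)
def gfExpT : List Int := List.replicate 512 1
def gfLogT : List Int := List.replicate 256 0

-- gf_mul, shared module-level helper of both A and B (transliterated step for step)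
def gf_mul (x y : Int) : Int :=
  if x = 0 ∨ y = 0 then 0
  else PySem.List.pyGetD gfExpT
        (PySem.Int.mod (PySem.List.pyGetD gfLogT x 0 + PySem.List.pyGetD gfLogT y 0) 255) 0

-- inner loop of A: for i in range(0, len(fsynd)-1): fsynd[i] = gf_mul(fsynd[i], x) ^ fsynd[i+1]
def rsInnerA (x : Int) (fsynd : List Int) : List Int :=
  (List.range (fsynd.length - 1)).foldl
    (fun (g : List Int) (i : Nat) =>
      PySem.List.pySetD g (i : Int)
        (PySem.Int.bxor (gf_mul (PySem.List.pyGetD g (i : Int) 0) x)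
                        (PySem.List.pyGetD g ((i : Int) + 1) 0)))
    fsynd

def rs_forney_syndromes (synd : List Int) (pos : List Int) (nmess : Int) : List Int :=
  -- fsynd = list(synd); for i in range(0, len(pos)): x = gf_exp[nmess-1-pos[i]]; <inner loop>; fsynd.pop()
  pos.foldl
    (fun fsynd p =>
      (rsInnerA (PySem.List.pyGetD gfExpT (nmess - 1 - p) 0) fsynd).dropLast)
    synd

-- ===== PORT B =====
-- for st, x in zip(state, xs): new_state.append(cur); cur = gf_mul(st, x) ^ cur
-- (returns the new state list built so far and the value of cur after the loop)
def cascadeB : List Int → List Int → Int → List Int × Int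
  | [], _, cur => ([], cur)
  | _ :: _, [], cur => ([], cur)      -- zip stops when xs is exhausted
  | st :: sts, x :: xs, cur =>
      let nxt := PySem.Int.bxor (gf_mul st x) cur
      let r := cascadeB sts xs nxt
      (cur :: r.1, r.2)

-- one loop-body of B: cascade s through the levels, then either warm up a new
-- level (state still shorter than m) or emit the fully reduced value
def stepB (xs : List Int) (m : Nat) (acc : List Int × List Int) (s : Int) : List Int × List Int :=
  let r := cascadeB acc.1 xs s
  if acc.1.length < m then (r.1 ++ [r.2], acc.2) else (r.1, acc.2 ++ [r.2])

def rs_forney_syndromes_alt (synd : List Int) (pos : List Int) (nmess : Int) : List Int :=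
  -- m = len(pos); xs = [gf_exp[nmess-1-p] for p in pos]; state=[]; out=[]; for s in synd: …
  let xs := pos.map (fun p => PySem.List.pyGetD gfExpT (nmess - 1 - p) 0)
  (synd.foldl (stepB xs pos.length) ([], [])).2

-- ===== PRECONDITION & SPEC =====
-- Pre_ excludes exactly the inputs where the Python A raises an IndexError:
-- more error positions than syndromes (pop from an empty list), a position whose
-- gf_exp index nmess-1-p falls outside [-512, 511], or (when pos is nonempty) a
-- non-final syndrome value outside gf_log's index range [-256, 255].
def Pre_rs_forney_syndromes (synd : List Int) (pos : List Int) (nmess : Int) : Prop :=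
  pos.length ≤ synd.length ∧
  (∀ p ∈ pos, -512 ≤ nmess - 1 - p ∧ nmess - 1 - p ≤ 511) ∧
  (pos = [] ∨ ∀ s ∈ synd.dropLast, -256 ≤ s ∧ s ≤ 255)
instance (synd : List Int) (pos : List Int) (nmess : Int) : Decidable (Pre_rs_forney_syndromes synd pos nmess) := by unfold Pre_rs_forney_syndromes; infer_instance

def pvWitness_rs_forney_syndromes : List Int × List Int × Int := ([1, 2, 3], [0], 3)

def Spec_rs_forney_syndromes (synd : List Int) (pos : List Int) (nmess : Int) (out : List Int) : Prop := out = rs_forney_syndromes_alt synd pos nmess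
instance (synd : List Int) (pos : List Int) (nmess : Int) (out : List Int) : Decidable (Spec_rs_forney_syndromes synd pos nmess out) := by unfold Spec_rs_forney_syndromes; infer_instance

-- ===== CLAIM (what is proved, stated in full; the proofs are below) =====
def Claim_equal_rs_forney_syndromes : Prop := ∀ (synd : List Int) (pos : List Int) (nmess : Int), Dom_rs_forney_syndromes synd pos nmess → Pre_rs_forney_syndromes synd pos nmess → Spec_rs_forney_syndromes synd pos nmess (rs_forney_syndromes synd pos nmess)

-- ===== LEMMAS AND PROOFS =====

-- one elimination pass, as a pure function (proof-level characterisation)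
def rsPass (x : Int) (f : List Int) : List Int :=
  (f.zip (f.drop 1)).map (fun ab => PySem.Int.bxor (gf_mul ab.1 x) ab.2)

-- Invariant of A's inner loop: after the fold over range m, the first m slots
-- carry the pass values and the rest is untouched.
theorem rsInnerA_invariant (x : Int) (f : List Int) :
    ∀ m, m + 1 ≤ f.length →
      (List.range m).foldl
        (fun (g : List Int) (i : Nat) =>
          PySem.List.pySetD g (i : Int)
            (PySem.Int.bxor (gf_mul (PySem.List.pyGetD g (i : Int) 0) x)
                            (PySem.List.pyGetD g ((i : Int) + 1) 0)))
        f
      = (rsPass x f).take m ++ f.drop m := by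
  intro m
  induction m with
  | zero => intro _; rfl
  | succ m ih =>
    intro hm
    have hZlen : (rsPass x f).length = f.length - 1 := by
      simp [rsPass]
    have hm' : m + 1 ≤ f.length := by omega
    have hmf : m < f.length := by omega
    have hmf1 : m + 1 < f.length := by omega
    have htake : ((rsPass x f).take m).length = m := by
      rw [List.length_take]; omega
    rw [List.range_succ, List.foldl_append, ih hm']
    simp only [List.foldl_cons, List.foldl_nil]
    have hg1 : PySem.List.pyGetD ((rsPass x f).take m ++ f.drop m) (m : Int) 0 = f[m] := by
      rw [PySem.List.pyGetD_natCast, List.getD_eq_getElem?_getD, List.getElem?_append_right (by omega),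
          htake]
      simp [hmf]
    have hg2 : PySem.List.pyGetD ((rsPass x f).take m ++ f.drop m) ((m : Int) + 1) 0 = f[m + 1] := by
      have : ((m : Int) + 1) = ((m + 1 : Nat) : Int) := by push_cast; ring
      rw [this, PySem.List.pyGetD_natCast, List.getD_eq_getElem?_getD,
          List.getElem?_append_right (by omega), htake]
      simp [List.getElem?_drop, hmf1]
    rw [hg1, hg2, PySem.List.pySetD_natCast]
    have hdrop : f.drop m = f[m] :: f.drop (m + 1) := (List.getElem_cons_drop hmf).symm
    have hZm : (rsPass x f)[m]'(by omega) =
        PySem.Int.bxor (gf_mul f[m] x) f[m + 1] := by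
      simp [rsPass, List.getElem_zip]
    calc ((rsPass x f).take m ++ f.drop m).set m (PySem.Int.bxor (gf_mul f[m] x) f[m + 1])
        = (rsPass x f).take m ++
            (PySem.Int.bxor (gf_mul f[m] x) f[m + 1] :: f.drop (m + 1)) := by
          rw [List.set_append_right _ _ (by omega), htake]
          simp only [Nat.sub_self, hdrop, List.set_cons_zero]
      _ = (rsPass x f).take (m + 1) ++ f.drop (m + 1) := by
          rw [List.take_add_one,
              List.getElem?_eq_getElem (show m < (rsPass x f).length by omega)]
          simp [hZm]

-- one pass of A equals rsPass, for every list
theorem pass_eq (x : Int) (f : List Int) :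
    (rsInnerA x f).dropLast = rsPass x f := by
  rcases f with _ | ⟨a, t⟩
  · simp [rsInnerA, rsPass]
  · have hlen : ((a :: t).length - 1) + 1 ≤ (a :: t).length := by simp
    have hZlen : (rsPass x (a :: t)).length = (a :: t).length - 1 := by simp [rsPass]
    have h := rsInnerA_invariant x (a :: t) ((a :: t).length - 1) hlen
    have hdrop : (a :: t).drop ((a :: t).length - 1) =
        [(a :: t).getLast (by simp)] := by
      rw [List.drop_length_sub_one (by simp)]
    rw [rsInnerA, h, List.take_of_length_le (by omega), hdrop, List.dropLast_concat]

theorem rsPass_nil (x : Int) : rsPass x [] = [] := rfl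

theorem rsPass_cons_cons (x a b : Int) (t : List Int) :
    rsPass x (a :: b :: t) = PySem.Int.bxor (gf_mul a x) b :: rsPass x (b :: t) := by
  simp [rsPass]

-- the stream with no levels just copies its input to the output
theorem stream_nil_levels : ∀ (l : List Int) (st out : List Int),
    (l.foldl (stepB [] 0) (st, out)).2 = out ++ l := by
  intro l
  induction l with
  | nil => intro st out; simp
  | cons s t ih =>
    intro st out
    have hstep : stepB [] 0 (st, out) s = (([] : List Int), out ++ [s]) := by
      rcases st with _ | ⟨a, b⟩ <;> simp [stepB, cascadeB]
    simp only [List.foldl_cons, hstep, ih]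
    simp

-- pipeline decomposition: a stream with levels (x :: xs) whose state head is
-- prevlast behaves like the level-x filter feeding a stream with levels xs
theorem stream_pipe (x : Int) (xs : List Int) :
    ∀ (rest : List Int) (prevlast : Int) (substate subout : List Int),
      rest.foldl (stepB (x :: xs) (xs.length + 1)) (prevlast :: substate, subout)
      = ((rest.getLastD prevlast) ::
           ((rsPass x (prevlast :: rest)).foldl (stepB xs xs.length) (substate, subout)).1,
         ((rsPass x (prevlast :: rest)).foldl (stepB xs xs.length) (substate, subout)).2) := by
  intro rest
  induction rest with
  | nil => intro prevlast substate subout; simp [rsPass]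
  | cons s t ih =>
    intro prevlast substate subout
    have hbig : stepB (x :: xs) (xs.length + 1) (prevlast :: substate, subout) s
        = (s :: (stepB xs xs.length (substate, subout) (PySem.Int.bxor (gf_mul prevlast x) s)).1,
           (stepB xs xs.length (substate, subout) (PySem.Int.bxor (gf_mul prevlast x) s)).2) := by
      simp only [stepB, cascadeB]
      by_cases h : substate.length < xs.length
      · simp [h]
      · simp [h]
    rw [List.foldl_cons, hbig, ih]
    rw [rsPass_cons_cons, List.foldl_cons]
    rcases t with _ | ⟨u, v⟩
    · simp
    · rcases hl : (u :: v).getLast? with _ | w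
      · simp at hl
      · simp [hl]

-- iterated passes on the empty list stay empty
theorem passes_nil (xs : List Int) : xs.foldl (fun g x => rsPass x g) [] = [] := by
  induction xs with
  | nil => rfl
  | cons y ys ihy => simpa using ihy

-- the streaming fold equals the iterated passes, for every level list
theorem stream_eq_passes : ∀ (xs synd : List Int),
    (synd.foldl (stepB xs xs.length) ([], [])).2
    = xs.foldl (fun g x => rsPass x g) synd := by
  intro xs
  induction xs with
  | nil =>
    intro synd
    simpa using stream_nil_levels synd [] []
  | cons x xs ih =>
    intro synd
    rcases synd with _ | ⟨s, t⟩
    · simp [rsPass_nil, passes_nil]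
    · have hfirst : stepB (x :: xs) (xs.length + 1) ([], []) s = ([s], []) := by
        simp [stepB, cascadeB]
      rw [List.foldl_cons]
      simp only [List.length_cons, hfirst]
      rw [stream_pipe x xs t s [] []]
      simpa using ih (rsPass x (s :: t))

-- ===== VERDICT (by name: the statement is the Claim_ definition above) =====
theorem rs_forney_syndromes_spec : Claim_equal_rs_forney_syndromes := by
  intro synd pos nmess _ _
  unfold Spec_rs_forney_syndromes rs_forney_syndromes rs_forney_syndromes_alt
  rw [show pos.length = (pos.map (fun p => PySem.List.pyGetD gfExpT (nmess - 1 - p) 0)).length by simp]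
  rw [stream_eq_passes, List.foldl_map]
  simp only [pass_eq]
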